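-- pv_equiv track=rewrite | github.com/Kaizenautomations/farehawk | api/services/deal_score.py | _is_short_haul_domestic
-- ===== SOURCE A (Python) =====
-- def _is_short_haul_domestic(origin: str, dest: str) -> bool:
--     """Heuristic: is this a short-haul domestic route (<~1000mi)?"""
--     # Group airports by rough geographic region
--     WEST = {"LAX", "SFO", "SJC", "OAK", "BUR", "SNA", "ONT", "LGB", "LAS", "PHX",
--             "SEA", "PDX", "SLC", "TUS", "COS"}
--     MIDWEST = {"ORD", "MDW", "MSP", "DEN", "DFW", "DAL"}
--     EAST = {"JFK", "EWR", "LGA", "BOS", "PVD", "MHT", "IAD", "DCA", "BWI", "BUF",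
--             "ATL", "MIA", "FLL", "MCO"}
--     HAWAII = {"HNL"}
--     WEST_CANADA = {"YVR", "YYC", "YEG", "YLW", "YXX", "YYJ"}
--     EAST_CANADA = {"YYZ", "YTZ", "YUL", "YOW", "YHZ", "YQB"}
--     CENTRAL_CANADA = {"YWG", "YQR", "YXE"}
--
--     # Same region = short-haul
--     for region in [WEST, MIDWEST, EAST, HAWAII, WEST_CANADA, EAST_CANADA, CENTRAL_CANADA]:
--         if origin in region and dest in region:
--             return True
--     return False
-- ===== SOURCE B (Python) =====
-- # Flat code->region index built once; two O(1) lookups instead of scanning seven sets.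
-- _REGION = {
--     "LAX": "W", "SFO": "W", "SJC": "W", "OAK": "W", "BUR": "W", "SNA": "W",
--     "ONT": "W", "LGB": "W", "LAS": "W", "PHX": "W", "SEA": "W", "PDX": "W",
--     "SLC": "W", "TUS": "W", "COS": "W",
--     "ORD": "MW", "MDW": "MW", "MSP": "MW", "DEN": "MW", "DFW": "MW", "DAL": "MW",
--     "JFK": "E", "EWR": "E", "LGA": "E", "BOS": "E", "PVD": "E", "MHT": "E",
--     "IAD": "E", "DCA": "E", "BWI": "E", "BUF": "E", "ATL": "E", "MIA": "E",
--     "FLL": "E", "MCO": "E",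
--     "HNL": "H",
--     "YVR": "WC", "YYC": "WC", "YEG": "WC", "YLW": "WC", "YXX": "WC", "YYJ": "WC",
--     "YYZ": "EC", "YTZ": "EC", "YUL": "EC", "YOW": "EC", "YHZ": "EC", "YQB": "EC",
--     "YWG": "CC", "YQR": "CC", "YXE": "CC",
-- }
--
--
-- def _is_short_haul_domestic(origin: str, dest: str) -> bool:
--     """Heuristic: is this a short-haul domestic route (<~1000mi)?"""
--     r = _REGION.get(origin)
--     return r is not None and r == _REGION.get(dest)
-- ===== Notes on version B (the rewrite author's own statement) =====
-- stated objective: idiomatic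
-- what changed: Replaced the loop over seven region sets (membership test of both codes in each) by a single flat code-to-region dict built once, with the result computed from two direct lookups (both found and equal).
import Mathlib
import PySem

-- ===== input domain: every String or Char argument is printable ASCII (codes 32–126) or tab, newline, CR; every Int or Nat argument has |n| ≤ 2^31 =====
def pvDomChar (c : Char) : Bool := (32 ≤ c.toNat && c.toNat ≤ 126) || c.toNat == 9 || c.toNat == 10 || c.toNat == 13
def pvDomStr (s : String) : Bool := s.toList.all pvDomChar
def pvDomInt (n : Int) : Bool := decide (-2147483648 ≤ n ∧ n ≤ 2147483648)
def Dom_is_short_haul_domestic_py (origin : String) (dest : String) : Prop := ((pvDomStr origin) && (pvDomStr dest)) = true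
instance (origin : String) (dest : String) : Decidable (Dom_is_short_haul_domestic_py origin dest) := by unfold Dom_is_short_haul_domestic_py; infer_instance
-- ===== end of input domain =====

-- B replaces A's scan of seven region sets by one flat code→region dict and two lookups (idiomatic; return value only).

-- ===== PORT A =====
def pvWEST : PySem.Set String := PySem.Set.ofList ["LAX", "SFO", "SJC", "OAK", "BUR", "SNA", "ONT", "LGB", "LAS", "PHX", "SEA", "PDX", "SLC", "TUS", "COS"]
def pvMIDWEST : PySem.Set String := PySem.Set.ofList ["ORD", "MDW", "MSP", "DEN", "DFW", "DAL"]
def pvEAST : PySem.Set String := PySem.Set.ofList ["JFK", "EWR", "LGA", "BOS", "PVD", "MHT", "IAD", "DCA", "BWI", "BUF", "ATL", "MIA", "FLL", "MCO"]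
def pvHAWAII : PySem.Set String := PySem.Set.ofList ["HNL"]
def pvWEST_CANADA : PySem.Set String := PySem.Set.ofList ["YVR", "YYC", "YEG", "YLW", "YXX", "YYJ"]
def pvEAST_CANADA : PySem.Set String := PySem.Set.ofList ["YYZ", "YTZ", "YUL", "YOW", "YHZ", "YQB"]
def pvCENTRAL_CANADA : PySem.Set String := PySem.Set.ofList ["YWG", "YQR", "YXE"]

-- the 'for region in [...]' loop: first region containing both codes returns True, else False
def pvRegionLoop (origin dest : String) : List (PySem.Set String) → Bool
  | [] => false
  | region :: rest =>
      if PySem.Set.contains region origin && PySem.Set.contains region dest then true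
      else pvRegionLoop origin dest rest

def is_short_haul_domestic_py (origin : String) (dest : String) : Bool :=
  pvRegionLoop origin dest [pvWEST, pvMIDWEST, pvEAST, pvHAWAII, pvWEST_CANADA, pvEAST_CANADA, pvCENTRAL_CANADA]

-- ===== PORT B =====
def pvREGION : PySem.Dict String String := PySem.Dict.mk [("LAX", "W"), ("SFO", "W"), ("SJC", "W"), ("OAK", "W"), ("BUR", "W"), ("SNA", "W"), ("ONT", "W"), ("LGB", "W"), ("LAS", "W"), ("PHX", "W"), ("SEA", "W"), ("PDX", "W"), ("SLC", "W"), ("TUS", "W"), ("COS", "W"), ("ORD", "MW"), ("MDW", "MW"), ("MSP", "MW"), ("DEN", "MW"), ("DFW", "MW"), ("DAL", "MW"), ("JFK", "E"), ("EWR", "E"), ("LGA", "E"), ("BOS", "E"), ("PVD", "E"), ("MHT", "E"), ("IAD", "E"), ("DCA", "E"), ("BWI", "E"), ("BUF", "E"), ("ATL", "E"), ("MIA", "E"), ("FLL", "E"), ("MCO", "E"), ("HNL", "H"), ("YVR", "WC"), ("YYC", "WC"), ("YEG", "WC"), ("YLW", "WC"), ("YXX", "WC"), ("YYJ", "WC"),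 ("YYZ", "EC"), ("YTZ", "EC"), ("YUL", "EC"), ("YOW", "EC"), ("YHZ", "EC"), ("YQB", "EC"), ("YWG", "CC"), ("YQR", "CC"), ("YXE", "CC")]

def is_short_haul_domestic_py_alt (origin : String) (dest : String) : Bool :=
  match PySem.Dict.get? pvREGION origin with
  | none => false
  | some r => some r == PySem.Dict.get? pvREGION dest

-- ===== PRECONDITION & SPEC =====
def Spec_is_short_haul_domestic_py (origin : String) (dest : String) (out : Bool) : Prop := out = is_short_haul_domestic_py_alt origin dest
instance (origin : String) (dest : String) (out : Bool) : Decidable (Spec_is_short_haul_domestic_py origin dest out) := by unfold Spec_is_short_haul_domestic_py; infer_instance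

-- ===== CLAIM (what is proved, stated in full; the proofs are below) =====
def Claim_equal_is_short_haul_domestic_py : Prop := ∀ (origin : String) (dest : String), Dom_is_short_haul_domestic_py origin dest → Spec_is_short_haul_domestic_py origin dest (is_short_haul_domestic_py origin dest)

-- ===== LEMMAS AND PROOFS =====

-- For every string s: membership in each region set equals the flat-dict lookup returning
-- that region's tag, and the lookup only ever yields one of the seven tags (or none).
set_option maxRecDepth 8192 in
theorem pv_classify (s : String) :
    (PySem.Set.contains pvWEST s = (PySem.Dict.get? pvREGION s == some "W")) ∧
    (PySem.Set.contains pvMIDWEST s = (PySem.Dict.get? pvREGION s == some "MW")) ∧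
    (PySem.Set.contains pvEAST s = (PySem.Dict.get? pvREGION s == some "E")) ∧
    (PySem.Set.contains pvHAWAII s = (PySem.Dict.get? pvREGION s == some "H")) ∧
    (PySem.Set.contains pvWEST_CANADA s = (PySem.Dict.get? pvREGION s == some "WC")) ∧
    (PySem.Set.contains pvEAST_CANADA s = (PySem.Dict.get? pvREGION s == some "EC")) ∧
    (PySem.Set.contains pvCENTRAL_CANADA s = (PySem.Dict.get? pvREGION s == some "CC")) ∧
    (PySem.Dict.get? pvREGION s = none ∨ PySem.Dict.get? pvREGION s = some "W" ∨ PySem.Dict.get? pvREGION s = some "MW" ∨ PySem.Dict.get? pvREGION s = some "E" ∨ PySem.Dict.get? pvREGION s = some "H" ∨ PySem.Dict.get? pvREGION s = some "WC" ∨ PySem.Dict.get? pvREGION s = some "EC" ∨ PySem.Dict.get? pvREGION s = some "CC") := by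
  by_cases h1 : ("LAX" : String) = s
  · subst h1; decide
  by_cases h2 : ("SFO" : String) = s
  · subst h2; decide
  by_cases h3 : ("SJC" : String) = s
  · subst h3; decide
  by_cases h4 : ("OAK" : String) = s
  · subst h4; decide
  by_cases h5 : ("BUR" : String) = s
  · subst h5; decide
  by_cases h6 : ("SNA" : String) = s
  · subst h6; decide
  by_cases h7 : ("ONT" : String) = s
  · subst h7; decide
  by_cases h8 : ("LGB" : String) = s
  · subst h8; decide
  by_cases h9 : ("LAS" : String) = s
  · subst h9; decide
  by_cases h10 : ("PHX" : String) = s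
  · subst h10; decide
  by_cases h11 : ("SEA" : String) = s
  · subst h11; decide
  by_cases h12 : ("PDX" : String) = s
  · subst h12; decide
  by_cases h13 : ("SLC" : String) = s
  · subst h13; decide
  by_cases h14 : ("TUS" : String) = s
  · subst h14; decide
  by_cases h15 : ("COS" : String) = s
  · subst h15; decide
  by_cases h16 : ("ORD" : String) = s
  · subst h16; decide
  by_cases h17 : ("MDW" : String) = s
  · subst h17; decide
  by_cases h18 : ("MSP" : String) = s
  · subst h18; decide
  by_cases h19 : ("DEN" : String) = s
  · subst h19; decide
  by_cases h20 : ("DFW" : String) = s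
  · subst h20; decide
  by_cases h21 : ("DAL" : String) = s
  · subst h21; decide
  by_cases h22 : ("JFK" : String) = s
  · subst h22; decide
  by_cases h23 : ("EWR" : String) = s
  · subst h23; decide
  by_cases h24 : ("LGA" : String) = s
  · subst h24; decide
  by_cases h25 : ("BOS" : String) = s
  · subst h25; decide
  by_cases h26 : ("PVD" : String) = s
  · subst h26; decide
  by_cases h27 : ("MHT" : String) = s
  · subst h27; decide
  by_cases h28 : ("IAD" : String) = s
  · subst h28; decide
  by_cases h29 : ("DCA" : String) = s
  · subst h29; decide
  by_cases h30 : ("BWI" : String) = s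
  · subst h30; decide
  by_cases h31 : ("BUF" : String) = s
  · subst h31; decide
  by_cases h32 : ("ATL" : String) = s
  · subst h32; decide
  by_cases h33 : ("MIA" : String) = s
  · subst h33; decide
  by_cases h34 : ("FLL" : String) = s
  · subst h34; decide
  by_cases h35 : ("MCO" : String) = s
  · subst h35; decide
  by_cases h36 : ("HNL" : String) = s
  · subst h36; decide
  by_cases h37 : ("YVR" : String) = s
  · subst h37; decide
  by_cases h38 : ("YYC" : String) = s
  · subst h38; decide
  by_cases h39 : ("YEG" : String) = s
  · subst h39; decide
  by_cases h40 : ("YLW" : String) = s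
  · subst h40; decide
  by_cases h41 : ("YXX" : String) = s
  · subst h41; decide
  by_cases h42 : ("YYJ" : String) = s
  · subst h42; decide
  by_cases h43 : ("YYZ" : String) = s
  · subst h43; decide
  by_cases h44 : ("YTZ" : String) = s
  · subst h44; decide
  by_cases h45 : ("YUL" : String) = s
  · subst h45; decide
  by_cases h46 : ("YOW" : String) = s
  · subst h46; decide
  by_cases h47 : ("YHZ" : String) = s
  · subst h47; decide
  by_cases h48 : ("YQB" : String) = s
  · subst h48; decide
  by_cases h49 : ("YWG" : String) = s
  · subst h49; decide
  by_cases h50 : ("YQR" : String) = s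
  · subst h50; decide
  by_cases h51 : ("YXE" : String) = s
  · subst h51; decide
  simp [pvWEST, pvMIDWEST, pvEAST, pvHAWAII, pvWEST_CANADA, pvEAST_CANADA, pvCENTRAL_CANADA,
    pvREGION, PySem.Set.contains, PySem.Set.ofList, PySem.Set.add, PySem.Set.empty,
    PySem.Dict.get?_mk_cons, PySem.Dict.get?, List.find?, List.foldl, h1, h2, h3, h4, h5, h6, h7, h8, h9, h10, h11, h12, h13, h14, h15, h16, h17, h18, h19, h20, h21, h22, h23, h24, h25, h26, h27, h28, h29, h30, h31, h32, h33, h34, h35, h36, h37, h38, h39, h40, h41, h42, h43, h44, h45, h46, h47, h48, h49, h50, h51,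
    Ne.symm h1,
    Ne.symm h2,
    Ne.symm h3,
    Ne.symm h4,
    Ne.symm h5,
    Ne.symm h6,
    Ne.symm h7,
    Ne.symm h8,
    Ne.symm h9,
    Ne.symm h10,
    Ne.symm h11,
    Ne.symm h12,
    Ne.symm h13,
    Ne.symm h14,
    Ne.symm h15,
    Ne.symm h16,
    Ne.symm h17,
    Ne.symm h18,
    Ne.symm h19,
    Ne.symm h20,
    Ne.symm h21,
    Ne.symm h22,
    Ne.symm h23,
    Ne.symm h24,
    Ne.symm h25,
    Ne.symm h26,
    Ne.symm h27,
    Ne.symm h28,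
    Ne.symm h29,
    Ne.symm h30,
    Ne.symm h31,
    Ne.symm h32,
    Ne.symm h33,
    Ne.symm h34,
    Ne.symm h35,
    Ne.symm h36,
    Ne.symm h37,
    Ne.symm h38,
    Ne.symm h39,
    Ne.symm h40,
    Ne.symm h41,
    Ne.symm h42,
    Ne.symm h43,
    Ne.symm h44,
    Ne.symm h45,
    Ne.symm h46,
    Ne.symm h47,
    Ne.symm h48,
    Ne.symm h49,
    Ne.symm h50,
    Ne.symm h51,
    show (("LAX":String) == s) = false by simp [h1],
    show (("SFO":String) == s) = false by simp [h2],
    show (("SJC":String) == s) = false by simp [h3],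
    show (("OAK":String) == s) = false by simp [h4],
    show (("BUR":String) == s) = false by simp [h5],
    show (("SNA":String) == s) = false by simp [h6],
    show (("ONT":String) == s) = false by simp [h7],
    show (("LGB":String) == s) = false by simp [h8],
    show (("LAS":String) == s) = false by simp [h9],
    show (("PHX":String) == s) = false by simp [h10],
    show (("SEA":String) == s) = false by simp [h11],
    show (("PDX":String) == s) = false by simp [h12],
    show (("SLC":String) == s) = false by simp [h13],
    show (("TUS":String) == s) = false by simp [h14],
    show (("COS":String) == s) = false by simp [h15],
    show (("ORD":String) == s) = false by simp [h16],
    show (("MDW":String) == s) = false by simp [h17],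
    show (("MSP":String) == s) = false by simp [h18],
    show (("DEN":String) == s) = false by simp [h19],
    show (("DFW":String) == s) = false by simp [h20],
    show (("DAL":String) == s) = false by simp [h21],
    show (("JFK":String) == s) = false by simp [h22],
    show (("EWR":String) == s) = false by simp [h23],
    show (("LGA":String) == s) = false by simp [h24],
    show (("BOS":String) == s) = false by simp [h25],
    show (("PVD":String) == s) = false by simp [h26],
    show (("MHT":String) == s) = false by simp [h27],
    show (("IAD":String) == s) = false by simp [h28],
    show (("DCA":String) == s) = false by simp [h29],
    show (("BWI":String) == s) = false by simp [h30],
    show (("BUF":String) == s) = false by simp [h31],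
    show (("ATL":String) == s) = false by simp [h32],
    show (("MIA":String) == s) = false by simp [h33],
    show (("FLL":String) == s) = false by simp [h34],
    show (("MCO":String) == s) = false by simp [h35],
    show (("HNL":String) == s) = false by simp [h36],
    show (("YVR":String) == s) = false by simp [h37],
    show (("YYC":String) == s) = false by simp [h38],
    show (("YEG":String) == s) = false by simp [h39],
    show (("YLW":String) == s) = false by simp [h40],
    show (("YXX":String) == s) = false by simp [h41],
    show (("YYJ":String) == s) = false by simp [h42],
    show (("YYZ":String) == s) = false by simp [h43],
    show (("YTZ":String) == s) = false by simp [h44],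
    show (("YUL":String) == s) = false by simp [h45],
    show (("YOW":String) == s) = false by simp [h46],
    show (("YHZ":String) == s) = false by simp [h47],
    show (("YQB":String) == s) = false by simp [h48],
    show (("YWG":String) == s) = false by simp [h49],
    show (("YQR":String) == s) = false by simp [h50],
    show (("YXE":String) == s) = false by simp [h51]]

-- ===== VERDICT (by name: the statement is the Claim_ definition above) =====
theorem is_short_haul_domestic_py_spec : Claim_equal_is_short_haul_domestic_py := by
  intro origin dest _
  unfold Spec_is_short_haul_domestic_py
  obtain ⟨o1, o2, o3, o4, o5, o6, o7, ho⟩ := pv_classify origin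
  obtain ⟨d1, d2, d3, d4, d5, d6, d7, hd⟩ := pv_classify dest
  simp only [is_short_haul_domestic_py, is_short_haul_domestic_py_alt, pvRegionLoop,
    o1, o2, o3, o4, o5, o6, o7, d1, d2, d3, d4, d5, d6, d7]
  rcases ho with ho|ho|ho|ho|ho|ho|ho|ho <;> rcases hd with hd|hd|hd|hd|hd|hd|hd|hd <;>
    rw [ho, hd] <;> decide
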